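-- pv_equiv track=rewrite | github.com/chestnutforestlabo/masakikuribayashi.github.io | markdown_generator.py | used_columns
-- ===== SOURCE A (Python) =====
-- def used_columns(fieldnames: list[str], rows: list[dict[str, str]]) -> list[str]:
--     if not rows:
--         return fieldnames
--     cols: list[str] = []
--     for col in fieldnames:
--         if any((row.get(col) or "").strip() for row in rows):
--             cols.append(col)
--     return cols
-- ===== SOURCE B (Python) =====
-- def used_columns(fieldnames: list[str], rows: list[dict[str, str]]) -> list[str]:
--     if not rows:
--         return fieldnames
--     used = set()
--     for row in rows:
--         for k, v in row.items():
--             if v.strip():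
--                 used.add(k)
--     return [col for col in fieldnames if col in used]
-- ===== Notes on version B (the rewrite author's own statement) =====
-- stated objective: faster
-- what changed: Inverts the column-outer/row-inner nested scan into a single pass over all rows building a set of keys with non-blank values, then filters fieldnames by membership, removing the per-column rescans of every row.
import Mathlib
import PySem

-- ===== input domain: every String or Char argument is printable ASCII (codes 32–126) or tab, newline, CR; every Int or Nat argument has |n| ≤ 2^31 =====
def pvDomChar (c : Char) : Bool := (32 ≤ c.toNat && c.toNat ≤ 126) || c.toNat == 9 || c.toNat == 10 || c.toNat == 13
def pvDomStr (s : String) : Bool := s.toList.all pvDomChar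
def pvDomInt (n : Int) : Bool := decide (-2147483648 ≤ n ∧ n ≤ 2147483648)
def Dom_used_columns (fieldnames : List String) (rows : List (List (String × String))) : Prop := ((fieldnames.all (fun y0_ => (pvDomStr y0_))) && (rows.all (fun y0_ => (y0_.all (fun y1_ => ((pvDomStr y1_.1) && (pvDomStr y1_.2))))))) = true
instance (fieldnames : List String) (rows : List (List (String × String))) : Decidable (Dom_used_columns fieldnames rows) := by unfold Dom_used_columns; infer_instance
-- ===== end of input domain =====

-- B replaces A's column-outer/row-inner nested scan by one pass over the rows building a set
-- of keys with non-blank values, then filters fieldnames by membership (objective: faster).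

-- ===== PORT A =====
def used_columns (fieldnames : List String) (rows : List (List (String × String))) : List String :=
  if rows = [] then fieldnames
  else
    -- cols = []; for col in fieldnames: if any((row.get(col) or "").strip() for row in rows): cols.append(col)
    fieldnames.foldl
      (fun cols col =>
        if rows.any (fun row =>
            PySem.Str.strip (((PySem.Dict.mk row).get? col).getD "") != "")
        then cols ++ [col] else cols) []

-- ===== PORT B =====
def used_columns_alt (fieldnames : List String) (rows : List (List (String × String))) : List String :=
  if rows = [] then fieldnames
  else
    -- used = set(); for row in rows: for k, v in row.items(): if v.strip(): used.add(k)
    let used : PySem.Set String :=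
      rows.foldl
        (fun s row =>
          row.foldl (fun s kv =>
            if PySem.Str.strip kv.2 != "" then PySem.Set.add s kv.1 else s) s)
        PySem.Set.empty
    -- [col for col in fieldnames if col in used]
    fieldnames.filter (fun col => PySem.Set.contains used col)

-- ===== PRECONDITION & SPEC =====
-- Pre_ restricts the association lists representing each row to distinct keys, since Python
-- dicts cannot hold duplicate keys; no Python input is excluded.
def Pre_used_columns (fieldnames : List String) (rows : List (List (String × String))) : Prop :=
  ∀ row ∈ rows, (row.map Prod.fst).Nodup
instance (fieldnames : List String) (rows : List (List (String × String))) : Decidable (Pre_used_columns fieldnames rows) := by unfold Pre_used_columns; infer_instance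
def pvWitness_used_columns : List String × (List (List (String × String))) :=
  (["a", "b", "c"], [[("a", " x"), ("b", "  ")], [("c", "")]])

def Spec_used_columns (fieldnames : List String) (rows : List (List (String × String))) (out : List String) : Prop := out = used_columns_alt fieldnames rows
instance (fieldnames : List String) (rows : List (List (String × String))) (out : List String) : Decidable (Spec_used_columns fieldnames rows out) := by unfold Spec_used_columns; infer_instance

-- ===== CLAIM (what is proved, stated in full; the proofs are below) =====
def Claim_equal_used_columns : Prop := ∀ (fieldnames : List String) (rows : List (List (String × String))), Dom_used_columns fieldnames rows → Pre_used_columns fieldnames rows → Spec_used_columns fieldnames rows (used_columns fieldnames rows)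

-- ===== LEMMAS AND PROOFS =====

-- membership in the inner fold over one row
theorem mem_inner_fold (row : List (String × String)) (s : PySem.Set String) (col : String) :
    col ∈ row.foldl (fun s kv =>
        if PySem.Str.strip kv.2 != "" then PySem.Set.add s kv.1 else s) s ↔
      col ∈ s ∨ ∃ kv ∈ row, kv.1 = col ∧ PySem.Str.strip kv.2 ≠ "" := by
  induction row generalizing s with
  | nil => simp
  | cons kv rest ih =>
    rw [List.foldl_cons]
    by_cases h : PySem.Str.strip kv.2 = ""
    · rw [if_neg (by simp [h]), ih]
      simp only [List.mem_cons]
      constructor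
      · rintro (hs | ⟨kv', hm, hr⟩)
        · exact Or.inl hs
        · exact Or.inr ⟨kv', Or.inr hm, hr⟩
      · rintro (hs | ⟨kv', (rfl | hm), hk, hv⟩)
        · exact Or.inl hs
        · exact absurd h hv
        · exact Or.inr ⟨kv', hm, hk, hv⟩
    · rw [if_pos (by simp [h]), ih]
      rw [PySem.Set.mem_add]
      simp only [List.mem_cons]
      constructor
      · rintro ((hs | rfl) | ⟨kv', hm, hr⟩)
        · exact Or.inl hs
        · exact Or.inr ⟨kv, Or.inl rfl, rfl, h⟩
        · exact Or.inr ⟨kv', Or.inr hm, hr⟩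
      · rintro (hs | ⟨kv', (rfl | hm), hk, hv⟩)
        · exact Or.inl (Or.inl hs)
        · exact Or.inl (Or.inr hk.symm)
        · exact Or.inr ⟨kv', hm, hk, hv⟩

-- membership in the set built by the outer fold
theorem mem_used_fold (rows : List (List (String × String))) (s : PySem.Set String) (col : String) :
    col ∈ rows.foldl (fun s row =>
        row.foldl (fun s kv =>
          if PySem.Str.strip kv.2 != "" then PySem.Set.add s kv.1 else s) s) s ↔
      col ∈ s ∨ ∃ row ∈ rows, ∃ kv ∈ row, kv.1 = col ∧ PySem.Str.strip kv.2 ≠ "" := by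
  induction rows generalizing s with
  | nil => simp
  | cons row rest ih =>
    rw [List.foldl_cons, ih, mem_inner_fold]
    simp only [List.mem_cons]
    constructor
    · rintro ((hs | ⟨kv, hm, hr⟩) | ⟨r, hm, h⟩)
      · exact Or.inl hs
      · exact Or.inr ⟨row, Or.inl rfl, kv, hm, hr⟩
      · exact Or.inr ⟨r, Or.inr hm, h⟩
    · rintro (hs | ⟨r, (rfl | hm), h⟩)
      · exact Or.inl (Or.inl hs)
      · exact Or.inl (Or.inr h)
      · exact Or.inr ⟨r, hm, h⟩

-- with distinct keys, A's per-row test is an existential over the row's pairs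
theorem row_test_iff (row : List (String × String)) (col : String)
    (hnd : (row.map Prod.fst).Nodup) :
    PySem.Str.strip (((PySem.Dict.mk row).get? col).getD "") ≠ "" ↔
      ∃ kv ∈ row, kv.1 = col ∧ PySem.Str.strip kv.2 ≠ "" := by
  induction row with
  | nil => simp [PySem.Dict.get?]; decide
  | cons kv rest ih =>
    simp only [List.map_cons, List.nodup_cons] at hnd
    rw [PySem.Dict.get?_mk_cons]
    by_cases h : kv.1 = col
    · subst h
      simp only [beq_self_eq_true, if_true, Option.getD_some, List.mem_cons]
      constructor
      · intro hv; exact ⟨kv, Or.inl rfl, rfl, hv⟩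
      · rintro ⟨kv', hmem, hkey, hv⟩
        rcases hmem with rfl | hmem
        · exact hv
        · exact absurd (hkey ▸ List.mem_map_of_mem hmem) hnd.1
    · have : (kv.1 == col) = false := beq_false_of_ne h
      rw [this]
      simp only [Bool.false_eq_true, if_false, ih hnd.2, List.mem_cons]
      constructor
      · rintro ⟨kv', hmem, rest'⟩; exact ⟨kv', Or.inr hmem, rest'⟩
      · rintro ⟨kv', hmem, hkey, hv⟩
        rcases hmem with rfl | hmem
        · exact absurd hkey h
        · exact ⟨kv', hmem, hkey, hv⟩

-- ===== VERDICT (by name: the statement is the Claim_ definition above) =====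
theorem used_columns_spec : Claim_equal_used_columns := by
  intro fieldnames rows _ hpre
  unfold Spec_used_columns used_columns used_columns_alt
  by_cases hr : rows = []
  · simp [hr]
  · simp only [hr, if_false]
    rw [PySem.List.foldl_append_if_eq_filter]
    simp only [List.nil_append]
    apply List.filter_congr
    intro col _
    rw [Bool.eq_iff_iff]
    simp only [List.any_eq_true, PySem.Set.contains, List.contains_iff_mem]
    rw [mem_used_fold]
    simp only [PySem.Set.empty, List.not_mem_nil, false_or]
    constructor
    · rintro ⟨row, hrow, htest⟩
      refine ⟨row, hrow, (row_test_iff row col (hpre row hrow)).mp ?_⟩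
      simpa using htest
    · rintro ⟨row, hrow, hex⟩
      have := (row_test_iff row col (hpre row hrow)).mpr hex
      exact ⟨row, hrow, by simpa using this⟩
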